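-- pv_equiv track=rewrite | github.com/myles1663/lancelot | src/core/memory/sqlite_store.py | _escape_fts5_query
-- ===== SOURCE A (Python) =====
-- def _escape_fts5_query(query: str) -> str:
--     """
--     Escape a query string for safe use with FTS5 MATCH.
--
--     FTS5 has special syntax characters that need handling.
--     This escapes the query by:
--     1. Replacing double quotes (FTS5 phrase delimiter)
--     2. Removing other problematic characters
--     3. Wrapping in double quotes for literal matching
--
--     Args:
--         query: Raw search query
--
--     Returns:
--         Escaped query safe for FTS5 MATCH
--     """
--     # Remove or escape FTS5 special characters
--     # FTS5 operators: AND, OR, NOT, NEAR, *, ^, :, -, +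
--     # Also need to handle quotes and parentheses
--     escaped = query.replace('"', '""')
--
--     # Remove other FTS5 special characters that could cause syntax errors
--     for char in ["'", "(", ")", "{", "}", "[", "]", "^", "*", ":", "-", "+"]:
--         escaped = escaped.replace(char, " ")
--
--     # Collapse multiple spaces
--     escaped = " ".join(escaped.split())
--
--     # Return empty query protection
--     if not escaped.strip():
--         return '""'
--
--     return f'"{escaped}"'
-- ===== SOURCE B (Python) =====
-- _SPECIALS = {"'", "(", ")", "{", "}", "[", "]", "^", "*", ":", "-", "+"}
--
--
-- def _escape_fts5_query(query: str) -> str: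
--     # Single left-to-right pass classifying each character, instead of
--     # thirteen successive full-string .replace scans.
--     parts = []
--     for ch in query:
--         if ch == '"':
--             parts.append('""')
--         elif ch in _SPECIALS:
--             parts.append(" ")
--         else:
--             parts.append(ch)
--
--     # Collapse multiple spaces
--     escaped = " ".join("".join(parts).split())
--
--     # Return empty query protection
--     if not escaped.strip():
--         return '""'
--
--     return f'"{escaped}"'
-- ===== Notes on version B (the rewrite author's own statement) =====
-- stated objective: alternative
-- what changed: Replaces the chain of thirteen successive full-string .replace scans with a single left-to-right pass that classifies each character (quote-doubling, special-to-space, or keep) via one set lookup.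
import Mathlib
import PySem

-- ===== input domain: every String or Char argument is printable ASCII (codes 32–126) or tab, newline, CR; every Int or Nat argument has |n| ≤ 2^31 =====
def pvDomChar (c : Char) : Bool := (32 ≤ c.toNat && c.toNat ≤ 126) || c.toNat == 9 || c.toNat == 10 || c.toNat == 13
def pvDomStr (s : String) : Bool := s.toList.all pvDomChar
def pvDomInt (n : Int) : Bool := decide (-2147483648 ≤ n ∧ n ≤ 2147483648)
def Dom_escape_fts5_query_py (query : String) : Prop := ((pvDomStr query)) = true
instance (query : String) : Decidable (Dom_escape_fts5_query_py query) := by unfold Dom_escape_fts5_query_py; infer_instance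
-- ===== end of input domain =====

-- B replaces A's chain of thirteen successive full-string .replace scans with one
-- left-to-right pass classifying each character (objective: alternative decomposition).


-- ===== PORT A =====
-- the for-loop's list of single-character strings, as characters
def pvSpecialsA : List Char := ['\'', '(', ')', '{', '}', '[', ']', '^', '*', ':', '-', '+']

def escape_fts5_query_py (query : String) : String :=
  -- escaped = query.replace('"', '""')
  let e0 := PySem.Chars.replace query.toList ['"'] ['"', '"']
  -- for char in [...]: escaped = escaped.replace(char, " ")
  let e1 := pvSpecialsA.foldl (fun e c => PySem.Chars.replace e [c] [' ']) e0
  -- escaped = " ".join(escaped.split())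
  let e2 := PySem.Chars.join [' '] (PySem.Chars.split₀ e1)
  -- if not escaped.strip(): return '""'  /  return f'"{escaped}"'
  if (PySem.Chars.strip e2).isEmpty then "\"\"" else String.ofList ('"' :: e2 ++ ['"'])

-- ===== PORT B =====
def pvSpecialsB : PySem.Set Char :=
  PySem.Set.ofList ['\'', '(', ')', '{', '}', '[', ']', '^', '*', ':', '-', '+']

-- one character's contribution: '""' for a quote, ' ' for a special, else the character
def pvClassify (c : Char) : List Char :=
  if c = '"' then ['"', '"']
  else if PySem.Set.contains pvSpecialsB c then [' ']
  else [c]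

def escape_fts5_query_py_alt (query : String) : String :=
  -- parts = []; for ch in query: parts.append(...)
  let parts := query.toList.foldl (fun acc c => acc ++ pvClassify c) []
  -- escaped = " ".join("".join(parts).split())
  let escaped := PySem.Chars.join [' '] (PySem.Chars.split₀ parts)
  -- if not escaped.strip(): return '""'  /  return f'"{escaped}"'
  if (PySem.Chars.strip escaped).isEmpty then "\"\"" else String.ofList ('"' :: escaped ++ ['"'])

-- ===== PRECONDITION & SPEC =====
def Spec_escape_fts5_query_py (query : String) (out : String) : Prop := out = escape_fts5_query_py_alt query
instance (query : String) (out : String) : Decidable (Spec_escape_fts5_query_py query out) := by unfold Spec_escape_fts5_query_py; infer_instance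

-- ===== CLAIM (what is proved, stated in full; the proofs are below) =====
def Claim_equal_escape_fts5_query_py : Prop := ∀ (query : String), Dom_escape_fts5_query_py query → Spec_escape_fts5_query_py query (escape_fts5_query_py query)

-- ===== LEMMAS AND PROOFS =====

-- replace with a single-character pattern is a flatMap over the characters
lemma replace_go_single (a : Char) (new : List Char) :
    ∀ (l acc : List Char) (fuel : Nat), l.length ≤ fuel →
      PySem.Chars.replace.go [a] new fuel l acc
        = acc.reverse ++ l.flatMap (fun c => if c = a then new else [c]) := by
  intro l
  induction l with
  | nil =>
      intro acc fuel _
      cases fuel <;> simp [PySem.Chars.replace.go]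
  | cons c t ih =>
      intro acc fuel hf
      cases fuel with
      | zero => simp at hf
      | succ fuel =>
        have ht : t.length ≤ fuel := by simpa using hf
        by_cases hc : c = a
        · subst hc
          have hpre : [c].isPrefixOf (c :: t) = true := by simp [List.isPrefixOf]
          simp only [PySem.Chars.replace.go, hpre, if_true, List.length_cons,
            List.length_nil, List.drop_succ_cons, List.drop_zero]
          rw [ih (new.reverse ++ acc) fuel (by simpa using ht)]
          simp
        · have hpre : [a].isPrefixOf (c :: t) = false := by
            simp [List.isPrefixOf, Ne.symm hc]
          simp only [PySem.Chars.replace.go]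
          rw [if_neg (by simp [hpre]), ih (c :: acc) fuel ht]
          simp [hc]

lemma replace_single (a : Char) (new cs : List Char) :
    PySem.Chars.replace cs [a] new
      = cs.flatMap (fun c => if c = a then new else [c]) := by
  simp only [PySem.Chars.replace]
  rw [if_neg (by simp), replace_go_single a new cs [] cs.length le_rfl]
  simp

-- replacing a single character BY a single character is a map
lemma replace_char (a b : Char) (cs : List Char) :
    PySem.Chars.replace cs [a] [b] = cs.map (fun c => if c = a then b else c) := by
  rw [replace_single, List.map_eq_flatMap]
  apply List.flatMap_congr
  intro c _
  split_ifs <;> rfl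

-- the whole for-loop over a list of special characters is one substitution map
lemma fold_replace_space (sp : List Char) (cs : List Char) :
    sp.foldl (fun e c => PySem.Chars.replace e [c] [' ']) cs
      = cs.map (fun c => if c ∈ sp then ' ' else c) := by
  induction sp generalizing cs with
  | nil => simp
  | cons a t ih =>
      rw [List.foldl_cons, replace_char, ih, List.map_map]
      apply List.map_congr_left
      intro c _
      by_cases hc : c = a <;> simp [hc, Function.comp]

-- membership in B's set of specials is membership in A's loop list
lemma contains_specials (c : Char) :
    PySem.Set.contains pvSpecialsB c = decide (c ∈ pvSpecialsA) := by
  simp [pvSpecialsB, PySem.Set.contains, pvSpecialsA, PySem.Set.ofList]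

-- A's thirteen replace scans compute exactly B's one-pass classification
lemma chain_eq_classify (cs : List Char) :
    pvSpecialsA.foldl (fun e c => PySem.Chars.replace e [c] [' '])
        (PySem.Chars.replace cs ['"'] ['"', '"'])
      = cs.flatMap pvClassify := by
  rw [replace_single, fold_replace_space, List.map_flatMap]
  apply List.flatMap_congr
  intro c _
  by_cases hq : c = '"'
  · subst hq; decide
  · simp only [List.map_cons, List.map_nil, pvClassify, if_neg hq,
      contains_specials]
    by_cases hs : c ∈ pvSpecialsA <;> simp [hs]

-- ===== VERDICT (by name: the statement is the Claim_ definition above) =====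
theorem escape_fts5_query_py_spec : Claim_equal_escape_fts5_query_py := by
  intro query _
  unfold Spec_escape_fts5_query_py escape_fts5_query_py escape_fts5_query_py_alt
  simp only [chain_eq_classify, PySem.List.foldl_append_eq_flatMap, List.nil_append]
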